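-- pv_equiv track=rewrite | github.com/linnb666/111 | 毕设/modules/kinematic_analyzer.py | _smooth_phases
-- ===== SOURCE A (Python) =====
-- from typing import List, Dict, Tuple, Optional
--
-- def _smooth_phases(phases: List[int], min_duration: int = 2) -> List[int]:
--     """平滑相位序列，消除孤立的错误检测"""
--     if len(phases) < min_duration * 2:
--         return phases
--
--     smoothed = phases.copy()
--
--     # 检测并修复孤立状态
--     i = 0
--     while i < len(smoothed):
--         # 找到当前状态的连续区间
--         start = i
--         current_phase = smoothed[i]
--         while i < len(smoothed) and smoothed[i] == current_phase:
--             i += 1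
--         duration = i - start
--
--         # 如果持续时间太短，用前后状态替换
--         if duration < min_duration and start > 0 and i < len(smoothed):
--             # 使用前一个状态填充
--             prev_phase = smoothed[start - 1]
--             for j in range(start, i):
--                 smoothed[j] = prev_phase
--
--     return smoothed
-- ===== SOURCE B (Python) =====
-- def _smooth_phases(phases, min_duration=2):
--     """Smooth a phase sequence by run-length encoding it once, then rebuilding the
--     output group by group, filling short interior groups from the already-built tail."""
--     if len(phases) < min_duration * 2:
--         return phases
--
--     groups = []
--     for p in phases:
--         if groups and groups[-1][0] == p:
--             groups[-1][1] += 1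
--         else:
--             groups.append([p, 1])
--
--     out = []
--     last = len(groups) - 1
--     for k, (v, n) in enumerate(groups):
--         if n < min_duration and 0 < k < last:
--             out.extend([out[-1]] * n)
--         else:
--             out.extend([v] * n)
--     return out
-- ===== Notes on version B (the rewrite author's own statement) =====
-- stated objective: alternative
-- what changed: B replaces A's in-place index/while scan with mutation of a copied list by a run-length encoding pass followed by a group-wise rebuild of the output, filling short interior groups from the tail of the list being built.
import Mathlib
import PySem

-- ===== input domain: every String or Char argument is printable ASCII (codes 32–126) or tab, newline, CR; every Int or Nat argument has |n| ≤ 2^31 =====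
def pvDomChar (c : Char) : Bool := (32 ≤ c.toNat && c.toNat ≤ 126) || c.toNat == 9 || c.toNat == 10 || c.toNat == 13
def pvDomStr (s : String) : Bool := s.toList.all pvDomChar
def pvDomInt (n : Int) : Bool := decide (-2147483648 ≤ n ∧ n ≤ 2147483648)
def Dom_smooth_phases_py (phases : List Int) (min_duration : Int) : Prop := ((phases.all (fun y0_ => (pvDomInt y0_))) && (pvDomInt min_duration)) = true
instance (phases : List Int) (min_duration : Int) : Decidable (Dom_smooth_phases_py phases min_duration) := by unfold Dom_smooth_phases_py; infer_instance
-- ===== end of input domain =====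

-- B replaces A's in-place index/while scan over a mutated copy by a run-length encoding
-- pass followed by a group-wise rebuild of the output (objective: alternative decomposition).

-- ===== PORT A =====
-- inner `while i < len(smoothed) and smoothed[i] == current_phase: i += 1`
def pvFindEnd (s : List Int) (c : Int) (i : Nat) : Nat :=
  if h : i < s.length then
    if s[i] = c then pvFindEnd s c (i + 1) else i
  else i
termination_by s.length - i
decreasing_by exact Nat.sub_succ_lt_self s.length i h

theorem pvFindEnd_ge (s : List Int) (c : Int) (i : Nat) : i ≤ pvFindEnd s c i := by
  fun_induction pvFindEnd s c i <;> omega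

theorem pvFindEnd_succ_le (s : List Int) (i : Nat) (h : i < s.length) :
    i + 1 ≤ pvFindEnd s (s[i]) i := by
  rw [pvFindEnd]
  simp only [dif_pos h, if_pos]
  exact pvFindEnd_ge s _ (i + 1)

-- `for j in range(start, i): smoothed[j] = prev_phase`
def pvFill (s : List Int) (a b : Nat) (prev : Int) : List Int :=
  (List.range' a (b - a)).foldl (fun t j => t.set j prev) s

theorem pvFill_length (s : List Int) (a b : Nat) (prev : Int) :
    (pvFill s a b prev).length = s.length := by
  unfold pvFill
  generalize List.range' a (b - a) = l
  induction l generalizing s with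
  | nil => rfl
  | cons x l ih => simp [List.foldl_cons, ih]

theorem pvLoopA_dec (s : List Int) (i : Nat) (h : i < s.length) :
    s.length - pvFindEnd s (s[i]) i < s.length - i :=
  Nat.sub_lt_sub_left h (pvFindEnd_succ_le s i h)

-- outer `while i < len(smoothed): …`
def pvLoopA (m : Int) (s : List Int) (i : Nat) : List Int :=
  if h : i < s.length then
    let i2 := pvFindEnd s (s[i]) i
    if ((i2 : Int) - (i : Int)) < m ∧ 0 < i ∧ i2 < s.length then
      pvLoopA m (pvFill s i i2 (s[i - 1]!)) i2
    else
      pvLoopA m s i2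
  else s
termination_by s.length - i
decreasing_by
  · simp only [pvFill_length]
    exact pvLoopA_dec s i h
  · exact pvLoopA_dec s i h

def smooth_phases_py (phases : List Int) (min_duration : Int) : List Int :=
  if (phases.length : Int) < min_duration * 2 then phases
  else pvLoopA min_duration phases 0

-- ===== PORT B =====
-- `if groups and groups[-1][0] == p: groups[-1][1] += 1 else: groups.append([p, 1])`
def pvRStep (gs : List (Int × Nat)) (p : Int) : List (Int × Nat) :=
  match gs.getLast? with
  | some (v, n) => if v = p then gs.dropLast ++ [(v, n + 1)] else gs ++ [(p, 1)]
  | none => [(p, 1)]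

-- body of B's `for k, (v, n) in enumerate(groups)` loop
def pvBStep (m : Int) (last : Nat) (out : List Int) (vk : (Int × Nat) × Nat) : List Int :=
  if (vk.1.2 : Int) < m ∧ 0 < vk.2 ∧ vk.2 < last then
    out ++ List.replicate vk.1.2 (out.getLastD 0)
  else
    out ++ List.replicate vk.1.2 vk.1.1

def smooth_phases_py_alt (phases : List Int) (min_duration : Int) : List Int :=
  if (phases.length : Int) < min_duration * 2 then phases
  else
    let groups := phases.foldl pvRStep []
    (groups.zipIdx.foldl (pvBStep min_duration (groups.length - 1)) [])

-- ===== PRECONDITION & SPEC =====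
def Spec_smooth_phases_py (phases : List Int) (min_duration : Int) (out : List Int) : Prop := out = smooth_phases_py_alt phases min_duration
instance (phases : List Int) (min_duration : Int) (out : List Int) : Decidable (Spec_smooth_phases_py phases min_duration out) := by unfold Spec_smooth_phases_py; infer_instance

-- ===== CLAIM (what is proved, stated in full; the proofs are below) =====
def Claim_equal_smooth_phases_py : Prop := ∀ (phases : List Int) (min_duration : Int), Dom_smooth_phases_py phases min_duration → Spec_smooth_phases_py phases min_duration (smooth_phases_py phases min_duration)

-- ===== LEMMAS AND PROOFS =====

-- flatten a run-length encoding
def pvFlatG : List (Int × Nat) → List Int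
  | [] => []
  | (v, n) :: gs => List.replicate n v ++ pvFlatG gs

-- well-formed RLE: positive counts, adjacent values distinct
def pvOk : List (Int × Nat) → Prop
  | [] => True
  | (v, _n) :: gs =>
    0 < (v, _n).2 ∧ (∀ w m', gs.head? = some (w, m') → w ≠ v) ∧ pvOk gs

-- the common mathematical recursion both ports compute: smooth groups left to right,
-- a short interior group is replaced by the previous (already-smoothed) value
def pvSm (m : Int) (prev : Option Int) : List (Int × Nat) → List Int
  | [] => []
  | (v, n) :: gs =>
    match prev with
    | some p =>
      if (n : Int) < m ∧ gs ≠ [] then List.replicate n p ++ pvSm m (some p) gs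
      else List.replicate n v ++ pvSm m (some v) gs
    | none => List.replicate n v ++ pvSm m (some v) gs

theorem pvFlatG_append (l r : List (Int × Nat)) :
    pvFlatG (l ++ r) = pvFlatG l ++ pvFlatG r := by
  induction l with
  | nil => simp [pvFlatG]
  | cons g l ih => cases g; simp [pvFlatG, ih]

theorem pvRStep_flat (gs : List (Int × Nat)) (p : Int) :
    pvFlatG (pvRStep gs p) = pvFlatG gs ++ [p] := by
  unfold pvRStep
  cases hl : gs.getLast? with
  | none =>
    simp only [List.getLast?_eq_none_iff] at hl
    subst hl; simp [pvFlatG]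
  | some g =>
    obtain ⟨v, n⟩ := g
    obtain ⟨l, rfl⟩ := List.getLast?_eq_some_iff.mp hl
    by_cases hv : v = p
    · subst hv
      simp [pvFlatG_append, pvFlatG, List.replicate_succ']
    · simp [hv, pvFlatG_append, pvFlatG]

theorem pvOk_snoc_inc (l : List (Int × Nat)) (v : Int) (n : Nat) :
    pvOk (l ++ [(v, n)]) → pvOk (l ++ [(v, n + 1)]) := by
  induction l with
  | nil => intro h; exact ⟨by omega, h.2⟩
  | cons g l ih =>
    obtain ⟨w, k⟩ := g
    intro ⟨h1, h2, h3⟩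
    refine ⟨h1, ?_, ih h3⟩
    intro w' m' hm
    cases l with
    | nil =>
      have hm' : v = w' ∧ n + 1 = m' := by simpa using hm
      have hv := h2 v n (by simp)
      rw [← hm'.1]; exact hv
    | cons g' l' => exact h2 w' m' (by simpa using hm)

theorem pvOk_snoc_new (l : List (Int × Nat)) (p : Int) (n : Nat)
    (hok : pvOk l) (hlast : ∀ v' n', l.getLast? = some (v', n') → v' ≠ p) (hn : 0 < n) :
    pvOk (l ++ [(p, n)]) := by
  induction l with
  | nil => exact ⟨hn, by simp, trivial⟩
  | cons g l ih =>
    obtain ⟨w, k⟩ := g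
    obtain ⟨h1, h2, h3⟩ := hok
    refine ⟨h1, ?_, ?_⟩
    · intro w' m' hm
      cases l with
      | nil =>
        have hm' : p = w' ∧ n = m' := by simpa using hm
        have hv := hlast w k (by simp)
        rw [← hm'.1]
        intro hc
        exact hv hc.symm
      | cons g' l' => exact h2 w' m' (by simpa using hm)
    · refine ih h3 ?_
      intro v' n' hl'
      refine hlast v' n' ?_
      cases l with
      | nil => simp at hl'
      | cons g' l' => rwa [List.getLast?_cons_cons]

theorem pvRStep_ok (gs : List (Int × Nat)) (p : Int) (hok : pvOk gs) :
    pvOk (pvRStep gs p) := by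
  unfold pvRStep
  cases hl : gs.getLast? with
  | none => exact ⟨Nat.one_pos, by simp, trivial⟩
  | some g =>
    obtain ⟨v, n⟩ := g
    obtain ⟨l, rfl⟩ := List.getLast?_eq_some_iff.mp hl
    by_cases hv : v = p
    · subst hv
      simp only [List.dropLast_concat]
      exact pvOk_snoc_inc _ _ _ hok
    · simp only [if_neg hv]
      refine pvOk_snoc_new _ p 1 hok ?_ Nat.one_pos
      intro v' n' h
      rw [hl] at h
      have h2 : v = v' ∧ n = n' := by simpa using h
      rw [← h2.1]; exact hv

theorem pvRle_spec (l : List Int) :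
    ∀ gs, pvOk gs → pvOk (l.foldl pvRStep gs) ∧ pvFlatG (l.foldl pvRStep gs) = pvFlatG gs ++ l := by
  induction l with
  | nil => intro gs h; simpa using h
  | cons p l ih =>
    intro gs h
    obtain ⟨h1, h2⟩ := ih (pvRStep gs p) (pvRStep_ok gs p h)
    refine ⟨h1, ?_⟩
    rw [List.foldl_cons] at *
    rw [h2, pvRStep_flat]
    simp

theorem pvFlatG_ne_nil (gs : List (Int × Nat)) (hok : pvOk gs) (h : gs ≠ []) :
    pvFlatG gs ≠ [] := by
  cases gs with
  | nil => exact absurd rfl h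
  | cons g gs =>
    obtain ⟨v, n⟩ := g
    obtain ⟨h1, -, -⟩ := hok
    obtain ⟨j, rfl⟩ : ∃ j, n = j + 1 := ⟨n - 1, by omega⟩
    simp [pvFlatG, List.replicate_succ]

theorem pvFlatG_head_ne (v : Int) (n : Nat) (gs : List (Int × Nat))
    (hok : pvOk ((v, n) :: gs)) : ∀ w, (pvFlatG gs).head? = some w → w ≠ v := by
  obtain ⟨-, hadj, hok'⟩ := hok
  intro w h
  cases gs with
  | nil => simp [pvFlatG] at h
  | cons g gs' =>
    obtain ⟨u, k⟩ := g
    obtain ⟨hk, -, -⟩ := hok'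
    obtain ⟨j, rfl⟩ : ∃ j, k = j + 1 := ⟨k - 1, by omega⟩
    simp [pvFlatG, List.replicate_succ] at h
    subst h
    exact hadj u (j + 1) rfl

theorem pvFindEnd_run : ∀ (n : Nat) (out rest : List Int) (v : Int),
    (∀ w, rest.head? = some w → w ≠ v) →
    pvFindEnd (out ++ (List.replicate n v ++ rest)) v out.length = out.length + n := by
  intro n
  induction n with
  | zero =>
    intro out rest v hr
    rw [pvFindEnd]
    simp only [List.replicate_zero, List.nil_append]
    split
    · rename_i h
      cases rest with
      | nil => simp at h
      | cons a l =>
        have hget : (out ++ a :: l)[out.length]'h = a := by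
          rw [List.getElem_append_right (le_refl _)]
          simp
        rw [hget, if_neg (hr a rfl)]
        omega
    · omega
  | succ n ih =>
    intro out rest v hr
    rw [pvFindEnd]
    have hlen : out.length < (out ++ (List.replicate (n+1) v ++ rest)).length := by
      simp
    simp only [dif_pos hlen]
    have hget : (out ++ (List.replicate (n+1) v ++ rest))[out.length]'hlen = v := by
      rw [List.getElem_append_right (by omega)]
      simp [List.replicate_succ]
    rw [if_pos hget]
    have hre : out ++ (List.replicate (n+1) v ++ rest)
        = (out ++ [v]) ++ (List.replicate n v ++ rest) := by
      simp [List.replicate_succ]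
    rw [hre]
    have hl : out.length + 1 = (out ++ [v]).length := by simp
    rw [hl, ih (out ++ [v]) rest v hr]
    simp; omega

theorem pvFill_run : ∀ (n : Nat) (out rest : List Int) (p v : Int),
    pvFill (out ++ (List.replicate n v ++ rest)) out.length (out.length + n) p
      = out ++ (List.replicate n p ++ rest) := by
  intro n
  induction n with
  | zero => intro out rest p v; simp [pvFill]
  | succ n ih =>
    intro out rest p v
    unfold pvFill
    have h1 : out.length + (n + 1) - out.length = n + 1 := by omega
    rw [h1, List.range'_succ, List.foldl_cons]
    have h2 : (out ++ (List.replicate (n+1) v ++ rest)).set out.length p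
        = (out ++ [p]) ++ (List.replicate n v ++ rest) := by
      rw [List.set_append_right _ _ (le_refl _)]
      simp [List.replicate_succ]
    rw [h2]
    have h3 := ih (out ++ [p]) rest p v
    unfold pvFill at h3
    have h4 : (out ++ [p]).length = out.length + 1 := by simp
    rw [h4] at h3
    have h5 : out.length + 1 + n - (out.length + 1) = n := by omega
    rw [h5] at h3
    rw [h3]
    simp [List.replicate_succ]

theorem pvPrev_read (out rest : List Int) (p : Int) (h : out.getLast? = some p) :
    (out ++ rest)[out.length - 1]! = p := by
  have hne : out ≠ [] := by intro hc; subst hc; simp at h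
  have hlt : out.length - 1 < out.length := by
    cases out with
    | nil => exact absurd rfl hne
    | cons a l => simp
  rw [List.getElem!_eq_getElem?_getD, List.getElem?_append_left hlt,
    ← List.getLast?_eq_getElem?, h]
  rfl

theorem pvLoopA_eq (m : Int) : ∀ (gs : List (Int × Nat)) (out : List Int), pvOk gs →
    pvLoopA m (out ++ pvFlatG gs) out.length = out ++ pvSm m out.getLast? gs := by
  intro gs
  induction gs with
  | nil =>
    intro out _
    rw [pvLoopA]
    simp [pvFlatG, pvSm]
  | cons g gs ih =>
    obtain ⟨v, n⟩ := g
    intro out hok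
    obtain ⟨hn, hadj, hok'⟩ := hok
    have hhead := pvFlatG_head_ne v n gs ⟨hn, hadj, hok'⟩
    rw [pvLoopA]
    simp only [pvFlatG]
    have hlen : out.length < (out ++ (List.replicate n v ++ pvFlatG gs)).length := by
      simp; omega
    simp only [dif_pos hlen]
    have hget : (out ++ (List.replicate n v ++ pvFlatG gs))[out.length]'hlen = v := by
      rw [List.getElem_append_right (by omega)]
      cases n with
      | zero => omega
      | succ k => simp [List.replicate_succ]
    rw [hget]
    rw [pvFindEnd_run n out (pvFlatG gs) v hhead]
    have hdur : ((out.length + n : Nat) : Int) - (out.length : Int) = (n : Int) := by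
      push_cast; ring
    rw [hdur]
    have hlast : out.length + n < (out ++ (List.replicate n v ++ pvFlatG gs)).length
        ↔ gs ≠ [] := by
      simp only [List.length_append, List.length_replicate]
      constructor
      · intro h hc; subst hc; simp [pvFlatG] at h
      · intro h
        have := pvFlatG_ne_nil gs hok' h
        have : 0 < (pvFlatG gs).length := List.length_pos_iff.mpr this
        omega
    cases hout : out.getLast? with
    | none =>
      have houtnil : out = [] := List.getLast?_eq_none_iff.mp hout
      subst houtnil
      rw [if_neg (by simp)]
      simp only [List.nil_append, List.length_nil] at *
      have h1 : List.replicate n v ++ pvFlatG gs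
          = List.replicate n v ++ pvFlatG gs := rfl
      have h2 : (0 + n) = (List.replicate n v).length := by simp
      rw [show pvLoopA m (List.replicate n v ++ pvFlatG gs) (0 + n)
            = pvLoopA m (List.replicate n v ++ pvFlatG gs) (List.replicate n v).length by
          rw [← h2]]
      rw [ih (List.replicate n v) hok']
      have h3 : (List.replicate n v).getLast? = some v := by
        cases n with
        | zero => omega
        | succ k => rw [List.replicate_succ', List.getLast?_concat]
      rw [h3]
      simp [pvSm]
    | some p =>
      have houtne : out ≠ [] := by intro hc; subst hc; simp at hout
      have houtlen : 0 < out.length := List.length_pos_iff.mpr houtne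
      by_cases hc : (n : Int) < m ∧ gs ≠ []
      · rw [if_pos ⟨hc.1, houtlen, hlast.mpr hc.2⟩]
        rw [pvPrev_read out _ p hout]
        rw [pvFill_run n out (pvFlatG gs) p v]
        have h2 : out.length + n = (out ++ List.replicate n p).length := by simp
        rw [show out ++ (List.replicate n p ++ pvFlatG gs)
              = (out ++ List.replicate n p) ++ pvFlatG gs by simp]
        rw [h2, ih (out ++ List.replicate n p) hok']
        have h3 : (out ++ List.replicate n p).getLast? = some p := by
          cases n with
          | zero => omega
          | succ k =>
            rw [List.replicate_succ', ← List.append_assoc, List.getLast?_concat]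
        rw [h3]
        simp [pvSm, if_pos hc]
      · rw [if_neg (by
          intro ⟨ha, hb, hcc⟩
          exact hc ⟨ha, hlast.mp hcc⟩)]
        have h2 : out.length + n = (out ++ List.replicate n v).length := by simp
        rw [show out ++ (List.replicate n v ++ pvFlatG gs)
              = (out ++ List.replicate n v) ++ pvFlatG gs by simp]
        rw [h2, ih (out ++ List.replicate n v) hok']
        have h3 : (out ++ List.replicate n v).getLast? = some v := by
          cases n with
          | zero => omega
          | succ k =>
            rw [List.replicate_succ', ← List.append_assoc, List.getLast?_concat]
        rw [h3]
        simp only [pvSm, if_neg hc]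
        simp

theorem pvLoopB_eq (m : Int) (L : Nat) : ∀ (gs : List (Int × Nat)) (k : Nat)
    (out : List Int) (p : Int), pvOk gs → k + gs.length = L → 1 ≤ k →
    out.getLast? = some p →
    (gs.zipIdx k).foldl (pvBStep m (L - 1)) out = out ++ pvSm m (some p) gs := by
  intro gs
  induction gs with
  | nil => intro k out p _ _ _ _; simp [pvSm]
  | cons g gs ih =>
    obtain ⟨v, n⟩ := g
    intro k out p hok hL hk hlast
    obtain ⟨hn, hadj, hok'⟩ := hok
    rw [List.zipIdx_cons, List.foldl_cons]
    have hL' : k + (gs.length + 1) = L := by simpa using hL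
    have hkL : (k < L - 1) ↔ gs ≠ [] := by
      cases gs with
      | nil => simp at hL' ⊢; omega
      | cons g' gs' => simp at hL' ⊢; omega
    by_cases hc : (n : Int) < m ∧ gs ≠ []
    · have hcond : (n : Int) < m ∧ 0 < k ∧ k < L - 1 := ⟨hc.1, by omega, hkL.mpr hc.2⟩
      have hstep : pvBStep m (L - 1) out ((v, n), k) = out ++ List.replicate n p := by
        unfold pvBStep
        rw [if_pos hcond]
        simp [List.getLastD_eq_getLast?, hlast]
      rw [hstep]
      have h3 : (out ++ List.replicate n p).getLast? = some p := by
        cases n with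
        | zero => omega
        | succ j =>
          rw [List.replicate_succ', ← List.append_assoc, List.getLast?_concat]
      rw [ih (k + 1) (out ++ List.replicate n p) p hok' (by omega) (by omega) h3]
      simp [pvSm, if_pos hc]
    · have hcond : ¬ ((n : Int) < m ∧ 0 < k ∧ k < L - 1) := by
        rintro ⟨ha, hb, hcc⟩
        exact hc ⟨ha, hkL.mp hcc⟩
      have hstep : pvBStep m (L - 1) out ((v, n), k) = out ++ List.replicate n v := by
        unfold pvBStep
        rw [if_neg hcond]
      rw [hstep]
      have h3 : (out ++ List.replicate n v).getLast? = some v := by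
        cases n with
        | zero => omega
        | succ j =>
          rw [List.replicate_succ', ← List.append_assoc, List.getLast?_concat]
      rw [ih (k + 1) (out ++ List.replicate n v) v hok' (by omega) (by omega) h3]
      simp only [pvSm, if_neg hc]
      simp

theorem pvB_top (m : Int) (gs : List (Int × Nat)) (hok : pvOk gs) :
    (gs.zipIdx.foldl (pvBStep m (gs.length - 1)) []) = pvSm m none gs := by
  cases gs with
  | nil => simp [pvSm]
  | cons g gs' =>
    obtain ⟨v, n⟩ := g
    obtain ⟨hn, hadj, hok'⟩ := hok
    rw [List.zipIdx_cons, List.foldl_cons]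
    have hstep : pvBStep m (((v, n) :: gs').length - 1) [] ((v, n), 0)
        = List.replicate n v := by
      unfold pvBStep
      rw [if_neg (by rintro ⟨-, hb, -⟩; omega)]
      simp
    rw [hstep]
    have h3 : (List.replicate n v).getLast? = some v := by
      cases n with
      | zero => omega
      | succ j => rw [List.replicate_succ', List.getLast?_concat]
    rw [pvLoopB_eq m ((v, n) :: gs').length gs' 1 (List.replicate n v) v hok'
      (by simp [Nat.add_comm]) (le_refl 1) h3]
    simp [pvSm]

-- ===== VERDICT (by name: the statement is the Claim_ definition above) =====
theorem smooth_phases_py_spec : Claim_equal_smooth_phases_py := by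
  intro phases m _
  unfold Spec_smooth_phases_py smooth_phases_py smooth_phases_py_alt
  by_cases hg : (phases.length : Int) < m * 2
  · rw [if_pos hg, if_pos hg]
  · rw [if_neg hg, if_neg hg]
    obtain ⟨hok, hflat⟩ := pvRle_spec phases [] trivial
    simp only [pvFlatG, List.nil_append] at hflat
    rw [pvB_top m _ hok]
    have := pvLoopA_eq m (phases.foldl pvRStep []) [] hok
    simp only [List.nil_append, List.length_nil, List.getLast?_nil] at this
    rw [hflat] at this
    exact this
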